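-- pv_equiv track=rewrite | github.com/skyeaaron/cds-monitoring | AuditLog/parsecer.py | cer_property_dict
-- ===== SOURCE A (Python) =====
-- def combine_property_fields(row, char = ';'):
--     """
--     given a list of property fields,
--     remove whitespace and
--     concatenate them with a semicolon
--     """
--     row = [x.strip() for x in row]
--     return '; '.join(row)
--
-- def cer_property_dict(cer_prop, header):
--     """
--     given a list of lists with cer properties
--     return a dictionary, with the cer rule ids as keys
--     and all associated properties in string delimited with the row and column
--     delimiters !!! and |||
--     basically, for each rule, we turn the list of properties into just another
--     field that can be diffed
--     trim the header to delete column 1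
--     """
--     outputdict = {}
--     for row in cer_prop:
--         #for each row, the first column is the key
--         #make a list of rows associated with each key
--         try:
--             outputdict[row[0]].append(combine_property_fields(row[1:]))
--         except KeyError:
--             outputdict[row[0]] = [combine_property_fields(row[1:])]
--     #now turn each list into a string using !!! as the delimiter
--     for rule in outputdict:
--         outputdict[rule] = '!!!'.join(outputdict[rule])
--     return outputdict, '; '.join(header[1:])
-- ===== SOURCE B (Python) =====
-- def combine_property_fields(row, char = ';'):
--     row = [x.strip() for x in row]
--     return '; '.join(row)
--
-- def cer_property_dict(cer_prop, header):
--     outputdict = {}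
--     for row in cer_prop:
--         s = combine_property_fields(row[1:])
--         k = row[0]
--         if k in outputdict:
--             outputdict[k] = outputdict[k] + '!!!' + s
--         else:
--             outputdict[k] = s
--     return outputdict, '; '.join(header[1:])
-- ===== Notes on version B (the rewrite author's own statement) =====
-- stated objective: simpler
-- what changed: B builds the final '!!!'-delimited string per key in a single pass over the rows, eliminating A's intermediate per-key lists and its separate second loop that joins them.
import Mathlib
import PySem

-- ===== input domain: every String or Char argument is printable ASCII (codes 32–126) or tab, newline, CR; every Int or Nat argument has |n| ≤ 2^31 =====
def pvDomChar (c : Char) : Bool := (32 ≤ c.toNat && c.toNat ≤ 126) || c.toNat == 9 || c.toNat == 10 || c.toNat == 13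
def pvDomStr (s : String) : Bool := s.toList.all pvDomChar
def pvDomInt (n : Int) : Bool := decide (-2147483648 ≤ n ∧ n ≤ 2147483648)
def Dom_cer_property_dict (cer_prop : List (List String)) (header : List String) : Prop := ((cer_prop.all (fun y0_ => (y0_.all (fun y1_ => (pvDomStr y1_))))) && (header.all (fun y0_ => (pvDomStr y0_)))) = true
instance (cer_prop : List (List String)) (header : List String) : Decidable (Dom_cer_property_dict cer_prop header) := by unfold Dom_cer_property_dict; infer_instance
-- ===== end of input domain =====

-- B accumulates each key's final '!!!'-delimited string in one pass; A collects per-key lists and joins them in a second loop.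

-- ===== PORT A =====
-- combine_property_fields(row) (the default parameter 'char' is unused by the Python)
def pvCombine (row : List String) : String :=
  PySem.Str.join "; " (row.map PySem.Str.strip)

-- try append / except KeyError: set  ==  Dict.modify with default [] (new keys append at the end, like Python)
def cer_property_dict (cer_prop : List (List String)) (header : List String) : (List (String × String)) × String :=
  let d := cer_prop.foldl (fun d row =>
      match row with
      | [] => d            -- Python raises IndexError here; excluded by Pre_
      | k :: rest => d.modify k [] (· ++ [pvCombine rest])) PySem.Dict.empty
  -- second loop: for rule in outputdict: outputdict[rule] = '!!!'.join(outputdict[rule])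
  (d.items.map (fun kv => (kv.1, PySem.Str.join "!!!" kv.2)),
   PySem.Str.join "; " (PySem.List.slice header (some 1) none))

-- ===== PORT B =====
-- Python string '+' is concatenation; exact via toList/ofList
def pvStrCat (a b : String) : String := String.ofList (a.toList ++ b.toList)

def cer_property_dict_alt (cer_prop : List (List String)) (header : List String) : (List (String × String)) × String :=
  let d := cer_prop.foldl (fun d row =>
      match row with
      | [] => d            -- Python raises IndexError here; excluded by Pre_
      | k :: rest =>
        let s := pvCombine rest
        match d.get? k with
        | some v => d.insert k (pvStrCat (pvStrCat v "!!!") s)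
        | none   => d.insert k s) PySem.Dict.empty
  (d.items, PySem.Str.join "; " (PySem.List.slice header (some 1) none))

-- ===== PRECONDITION & SPEC =====
-- Pre_ excludes only inputs containing an empty row, on which Python A raises IndexError (row[0]).
def Pre_cer_property_dict (cer_prop : List (List String)) (header : List String) : Prop :=
  ∀ row ∈ cer_prop, row ≠ []
instance (cer_prop : List (List String)) (header : List String) : Decidable (Pre_cer_property_dict cer_prop header) := by unfold Pre_cer_property_dict; infer_instance

def pvWitness_cer_property_dict : List (List String) × List String :=
  ([["r1", "a", "b"], ["r2", "c"], ["r1", " d "]], ["id", "prop", "val"])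

def Spec_cer_property_dict (cer_prop : List (List String)) (header : List String) (out : (List (String × String)) × String) : Prop := out = cer_property_dict_alt cer_prop header
instance (cer_prop : List (List String)) (header : List String) (out : (List (String × String)) × String) : Decidable (Spec_cer_property_dict cer_prop header out) := by unfold Spec_cer_property_dict; infer_instance

-- ===== CLAIM (what is proved, stated in full; the proofs are below) =====
def Claim_equal_cer_property_dict : Prop := ∀ (cer_prop : List (List String)) (header : List String), Dom_cer_property_dict cer_prop header → Pre_cer_property_dict cer_prop header → Spec_cer_property_dict cer_prop header (cer_property_dict cer_prop header)

-- ===== LEMMAS AND PROOFS =====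

-- '!!!'-join of a value list, and the value-wise join of an items list ("M")
def pvJ (v : List String) : String := PySem.Str.join "!!!" v
def pvM (l : List (String × List String)) : List (String × String) :=
  l.map (fun kv => (kv.1, pvJ kv.2))

theorem pvStrCat_toList (a b : String) : (pvStrCat a b).toList = a.toList ++ b.toList := by
  simp [pvStrCat]

theorem pvJ_singleton (s : String) : pvJ [s] = s := by
  apply String.toList_injective
  simp [pvJ, PySem.Str.toList_join, PySem.Chars.join_singleton]

theorem pv_join_snoc (sep x s : List Char) (xs : List (List Char)) :
    PySem.Chars.join sep (x :: (xs ++ [s])) = PySem.Chars.join sep (x :: xs) ++ sep ++ s := by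
  induction xs generalizing x with
  | nil => simp [PySem.Chars.join_cons_cons, PySem.Chars.join_singleton]
  | cons y ys ih =>
    rw [List.cons_append, PySem.Chars.join_cons_cons, PySem.Chars.join_cons_cons, ih y]
    simp

theorem pvJ_snoc (v : List String) (hv : v ≠ []) (s : String) :
    pvJ (v ++ [s]) = pvStrCat (pvStrCat (pvJ v) "!!!") s := by
  apply String.toList_injective
  obtain ⟨x, xs, rfl⟩ := List.exists_cons_of_ne_nil hv
  simp only [pvJ, PySem.Str.toList_join, pvStrCat_toList, List.map_append, List.map_cons,
    List.map_nil, List.cons_append]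
  rw [pv_join_snoc]

theorem pv_get?_mapM (l : List (String × List String)) (k : String) :
    (PySem.Dict.mk (pvM l)).get? k = ((PySem.Dict.mk l).get? k).map pvJ := by
  simp only [PySem.Dict.get?, pvM, List.find?_map]
  rcases h : List.find? (fun p => p.1 == k) l with _ | p
  · rw [show (fun p : String × String => p.1 == k) ∘ (fun kv : String × List String => (kv.1, pvJ kv.2)) = (fun p => p.1 == k) from rfl, h]
    rfl
  · rw [show (fun p : String × String => p.1 == k) ∘ (fun kv : String × List String => (kv.1, pvJ kv.2)) = (fun p => p.1 == k) from rfl, h]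
    rfl

theorem pv_contains_mapM (l : List (String × List String)) (k : String) :
    (PySem.Dict.mk (pvM l)).contains k = (PySem.Dict.mk l).contains k := by
  simp only [PySem.Dict.contains, pvM, List.any_map]
  rfl

-- the one-row step of B on the value-wise joined dict equals the join of A's one-row step
theorem pv_step (d : PySem.Dict String (List String))
    (hval : ∀ kv ∈ d.items, kv.2 ≠ []) (k : String) (s : String) :
    (match (PySem.Dict.mk (pvM d.items)).get? k with
     | some v => (PySem.Dict.mk (pvM d.items)).insert k (pvStrCat (pvStrCat v "!!!") s)
     | none   => (PySem.Dict.mk (pvM d.items)).insert k s)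
      = PySem.Dict.mk (pvM (d.modify k [] (· ++ [s])).items) := by
  rw [pv_get?_mapM]
  rcases hf : List.find? (fun p => p.1 == k) d.items with _ | p
  · -- key absent: both append at the end
    have hg : d.get? k = none := by simp [PySem.Dict.get?, hf]
    have hc : d.contains k = false := by
      simp only [PySem.Dict.contains, List.any_eq_false]
      intro p hp
      exact (List.find?_eq_none.mp hf) p hp
    have hc' : (PySem.Dict.mk (pvM d.items)).contains k = false := by
      rw [pv_contains_mapM]
      exact hc
    have hD : d.getD k [] = [] := by simp [PySem.Dict.getD, hg]
    rw [show (d.get? k).map pvJ = none by rw [hg]; rfl]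
    rw [PySem.Dict.modify, hD]
    simp only [PySem.Dict.insert, hc, hc', Bool.false_eq_true, if_false, List.nil_append]
    simp [pvM, pvJ_singleton]
  · -- key present: both replace in place
    have hg : d.get? k = some p.2 := by simp [PySem.Dict.get?, hf]
    have hc : d.contains k = true := by
      simp only [PySem.Dict.contains, List.any_eq_true]
      refine ⟨p, List.mem_of_find?_eq_some hf, ?_⟩
      have h2 := List.find?_some (p := fun q : String × List String => q.1 == k) hf
      simpa using h2
    have hc' : (PySem.Dict.mk (pvM d.items)).contains k = true := by
      rw [pv_contains_mapM]
      exact hc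
    have hvne : p.2 ≠ [] := hval p (List.mem_of_find?_eq_some hf)
    have hD : d.getD k [] = p.2 := by simp [PySem.Dict.getD, hg]
    rw [show (d.get? k).map pvJ = some (pvJ p.2) by rw [hg]; rfl]
    rw [PySem.Dict.modify, hD]
    simp only [PySem.Dict.insert, hc, hc', if_true]
    congr 1
    simp only [pvM, List.map_map]
    apply List.map_congr_left
    intro q hq
    by_cases hqk : q.1 == k
    · simp [Function.comp, hqk, pvJ_snoc p.2 hvne s]
    · simp [Function.comp, hqk]

-- values stored by A's loop are never the empty list
theorem pv_hval_step (d : PySem.Dict String (List String))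
    (hval : ∀ kv ∈ d.items, kv.2 ≠ []) (k : String) (s : String) :
    ∀ kv ∈ (d.modify k [] (· ++ [s])).items, kv.2 ≠ [] := by
  intro kv hkv
  simp only [PySem.Dict.modify, PySem.Dict.insert] at hkv
  by_cases hc : d.contains k = true
  · simp only [hc, if_true] at hkv
    rcases List.mem_map.mp hkv with ⟨q, hq, hq2⟩
    by_cases hqk : (q.1 == k) = true
    · rw [if_pos hqk] at hq2
      subst hq2; simp
    · rw [if_neg hqk] at hq2
      subst hq2; exact hval q hq
  · simp only [Bool.not_eq_true] at hc
    simp only [hc, Bool.false_eq_true, if_false] at hkv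
    rcases List.mem_append.mp hkv with h | h
    · exact hval kv h
    · simp only [List.mem_singleton] at h
      subst h; simp

-- the whole-loop invariant: B's running dict is the value-wise join of A's running dict
theorem pv_fold (rows : List (List String)) (hrows : ∀ r ∈ rows, r ≠ [])
    (d : PySem.Dict String (List String)) (hval : ∀ kv ∈ d.items, kv.2 ≠ []) :
    rows.foldl (fun d row =>
      match row with
      | [] => d
      | k :: rest =>
        let s := pvCombine rest
        match d.get? k with
        | some v => d.insert k (pvStrCat (pvStrCat v "!!!") s)
        | none   => d.insert k s) (PySem.Dict.mk (pvM d.items))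
      = PySem.Dict.mk (pvM ((rows.foldl (fun d row =>
          match row with
          | [] => d
          | k :: rest => d.modify k [] (· ++ [pvCombine rest])) d).items)) := by
  induction rows generalizing d with
  | nil => rfl
  | cons r rest ih =>
    obtain ⟨k, tl, rfl⟩ := List.exists_cons_of_ne_nil (hrows r (List.mem_cons_self))
    simp only [List.foldl_cons]
    rw [pv_step d hval k (pvCombine tl)]
    exact ih (fun r hr => hrows r (List.mem_cons_of_mem _ hr))
      _ (pv_hval_step d hval k (pvCombine tl))

-- ===== VERDICT (by name: the statement is the Claim_ definition above) =====
theorem cer_property_dict_spec : Claim_equal_cer_property_dict := by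
  intro cer_prop header _ hpre
  show cer_property_dict cer_prop header = cer_property_dict_alt cer_prop header
  have h := pv_fold cer_prop hpre PySem.Dict.empty
    (by intro kv hkv; simp [PySem.Dict.empty] at hkv)
  exact Prod.ext (congrArg PySem.Dict.items h).symm rfl
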